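-- pv_equiv track=rewrite | github.com/ppulimamidy/PersonalHealthAssistant | apps/mvp_api/api/medical_literature.py | _evidence_level_from_publication_types
-- ===== SOURCE A (Python) =====
-- from typing import Dict, List, Literal, Optional
--
-- def _evidence_level_from_publication_types(types: List[str]) -> str:
--     """Map PubMed publication types to evidence hierarchy: meta_analysis > rct > observational > other."""
--     if not types:
--         return "other"
--     lower = [t.lower() for t in types]
--     if any("meta-analysis" in t or "meta analysis" in t for t in lower):
--         return "meta_analysis"
--     if any(
--         "randomized controlled trial" in t
--         or "rct" in t
--         or "controlled clinical trial" in t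
--         for t in lower
--     ):
--         return "rct"
--     if any(
--         "observational" in t
--         or "cohort" in t
--         or "case-control" in t
--         or "cross-sectional" in t
--         or "systematic review" in t
--         for t in lower
--     ):
--         return "observational"
--     return "other"
-- ===== SOURCE B (Python) =====
-- _EVIDENCE_TABLE = [
--     (3, ("meta-analysis", "meta analysis")),
--     (2, ("randomized controlled trial", "rct", "controlled clinical trial")),
--     (1, ("observational", "cohort", "case-control", "cross-sectional", "systematic review")),
-- ]
--
-- _LEVELS = {3: "meta_analysis", 2: "rct", 1: "observational"}
--
--
-- def _rank(tl):
--     for rank, kws in _EVIDENCE_TABLE: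
--         if any(k in tl for k in kws):
--             return rank
--     return 0
--
--
-- def _evidence_level_from_publication_types(types):
--     best = 0
--     for t in types:
--         best = max(best, _rank(t.lower()))
--     return _LEVELS.get(best, "other")
-- ===== Notes on version B (the rewrite author's own statement) =====
-- stated objective: simpler
-- what changed: Replaces A's three sequential full-list any() scans with a single pass keeping a running maximum category rank per type via an ordered keyword table, then maps the final rank to its level name.
import Mathlib
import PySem

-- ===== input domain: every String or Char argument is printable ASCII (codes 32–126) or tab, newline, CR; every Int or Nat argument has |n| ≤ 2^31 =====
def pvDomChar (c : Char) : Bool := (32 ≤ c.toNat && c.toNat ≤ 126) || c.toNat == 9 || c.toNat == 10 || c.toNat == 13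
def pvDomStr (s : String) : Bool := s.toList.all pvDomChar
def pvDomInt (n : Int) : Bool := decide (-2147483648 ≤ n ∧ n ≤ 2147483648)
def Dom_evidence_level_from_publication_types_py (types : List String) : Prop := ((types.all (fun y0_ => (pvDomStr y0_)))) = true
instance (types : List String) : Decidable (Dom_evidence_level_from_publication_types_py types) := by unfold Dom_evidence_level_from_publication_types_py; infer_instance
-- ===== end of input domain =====

-- B replaces A's three sequential full-list any() scans by one pass that keeps a running
-- maximum category rank per type (objective: simpler decomposition; same asymptotic cost).

-- ===== PORT A =====
def evidence_level_from_publication_types_py (types : List String) : String :=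
  if types = [] then "other"
  else
    let lower := types.map PySem.Str.lower
    if lower.any (fun t => PySem.Str.isIn "meta-analysis" t || PySem.Str.isIn "meta analysis" t) then
      "meta_analysis"
    else if lower.any (fun t =>
        PySem.Str.isIn "randomized controlled trial" t || PySem.Str.isIn "rct" t
          || PySem.Str.isIn "controlled clinical trial" t) then
      "rct"
    else if lower.any (fun t =>
        PySem.Str.isIn "observational" t || PySem.Str.isIn "cohort" t
          || PySem.Str.isIn "case-control" t || PySem.Str.isIn "cross-sectional" t
          || PySem.Str.isIn "systematic review" t) then
      "observational"
    else "other"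

-- ===== PORT B =====
-- keyword tables (_EVIDENCE_TABLE rows) as hit tests on an already-lowercased string
def pvMetaHit (tl : String) : Bool :=
  PySem.Str.isIn "meta-analysis" tl || PySem.Str.isIn "meta analysis" tl
def pvRctHit (tl : String) : Bool :=
  PySem.Str.isIn "randomized controlled trial" tl || PySem.Str.isIn "rct" tl
    || PySem.Str.isIn "controlled clinical trial" tl
def pvObsHit (tl : String) : Bool :=
  PySem.Str.isIn "observational" tl || PySem.Str.isIn "cohort" tl
    || PySem.Str.isIn "case-control" tl || PySem.Str.isIn "cross-sectional" tl
    || PySem.Str.isIn "systematic review" tl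

-- _rank: first table row whose keywords hit, else 0
def pvRank (tl : String) : Nat :=
  if pvMetaHit tl then 3 else if pvRctHit tl then 2 else if pvObsHit tl then 1 else 0

def evidence_level_from_publication_types_py_alt (types : List String) : String :=
  let best := types.foldl (fun b t => max b (pvRank (PySem.Str.lower t))) 0
  -- _LEVELS.get(best, "other")
  if best = 3 then "meta_analysis"
  else if best = 2 then "rct"
  else if best = 1 then "observational"
  else "other"

-- ===== PRECONDITION & SPEC =====
def Spec_evidence_level_from_publication_types_py (types : List String) (out : String) : Prop := out = evidence_level_from_publication_types_py_alt types
instance (types : List String) (out : String) : Decidable (Spec_evidence_level_from_publication_types_py types out) := by unfold Spec_evidence_level_from_publication_types_py; infer_instance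

-- ===== CLAIM (what is proved, stated in full; the proofs are below) =====
def Claim_equal_evidence_level_from_publication_types_py : Prop := ∀ (types : List String), Dom_evidence_level_from_publication_types_py types → Spec_evidence_level_from_publication_types_py types (evidence_level_from_publication_types_py types)

-- ===== LEMMAS AND PROOFS =====

theorem pv_foldl_max_shift (l : List String) (b : Nat) :
    l.foldl (fun b t => max b (pvRank (PySem.Str.lower t))) b
      = max b (l.foldl (fun b t => max b (pvRank (PySem.Str.lower t))) 0) := by
  induction l generalizing b with
  | nil => simp
  | cons t l ih =>
      simp only [List.foldl_cons]
      rw [ih, ih (max 0 _)]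
      omega

-- the running maximum rank, characterised by A's three any-scans
theorem pv_best_eq (types : List String) :
    types.foldl (fun b t => max b (pvRank (PySem.Str.lower t))) 0
      = (if types.any (fun t => pvMetaHit (PySem.Str.lower t)) then 3
         else if types.any (fun t => pvRctHit (PySem.Str.lower t)) then 2
         else if types.any (fun t => pvObsHit (PySem.Str.lower t)) then 1
         else 0) := by
  induction types with
  | nil => simp
  | cons t l ih =>
      simp only [List.foldl_cons, List.any_cons]
      rw [pv_foldl_max_shift, ih, pvRank]
      by_cases hm : pvMetaHit (PySem.Str.lower t) <;>
        by_cases hr : pvRctHit (PySem.Str.lower t) <;>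
        by_cases ho : pvObsHit (PySem.Str.lower t) <;>
        simp [hm, hr, ho] <;> split_ifs <;> omega

-- ===== VERDICT (by name: the statement is the Claim_ definition above) =====
theorem evidence_level_from_publication_types_py_spec : Claim_equal_evidence_level_from_publication_types_py := by
  intro types _
  unfold Spec_evidence_level_from_publication_types_py
  unfold evidence_level_from_publication_types_py evidence_level_from_publication_types_py_alt
  simp only [List.any_map, Function.comp_def, pv_best_eq]
  rcases types with _ | ⟨t, l⟩
  · simp
  · simp only [pvMetaHit, pvRctHit, pvObsHit]
    split_ifs <;> simp_all
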